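-- pv_equiv track=rewrite | github.com/iopoi/network_project_submit | analysis1.py | splitDataByTime
-- ===== SOURCE A (Python) =====
-- def splitDataByTime(time_split, data):
-- 	d = list()
-- 	counter = 0
-- 	for n, i in enumerate(data[:-1]):
-- 		d.append((i[0], i[1], i[2], i[3], counter))
-- 		if data[n+1][2] - data[n][2] > time_split:
-- 			counter += 1
-- 	return d
-- ===== SOURCE B (Python) =====
-- def splitDataByTime(time_split, data):
--     # boundary indicators, then prefix-sum labels, then tuple assembly
--     gaps = [1 if b[2] - a[2] > time_split else 0 for a, b in zip(data, data[1:])]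
--     labels = [0]
--     for g in gaps:
--         labels.append(labels[-1] + g)
--     return [(i[0], i[1], i[2], i[3], c) for i, c in zip(data[:-1], labels)]
-- ===== Notes on version B (the rewrite author's own statement) =====
-- stated objective: alternative
-- what changed: Replaces the single fused counter loop by three separated passes: a gap-indicator list over adjacent pairs, a prefix-sum pass producing group labels, and a zip that assembles the output tuples.
import Mathlib
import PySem

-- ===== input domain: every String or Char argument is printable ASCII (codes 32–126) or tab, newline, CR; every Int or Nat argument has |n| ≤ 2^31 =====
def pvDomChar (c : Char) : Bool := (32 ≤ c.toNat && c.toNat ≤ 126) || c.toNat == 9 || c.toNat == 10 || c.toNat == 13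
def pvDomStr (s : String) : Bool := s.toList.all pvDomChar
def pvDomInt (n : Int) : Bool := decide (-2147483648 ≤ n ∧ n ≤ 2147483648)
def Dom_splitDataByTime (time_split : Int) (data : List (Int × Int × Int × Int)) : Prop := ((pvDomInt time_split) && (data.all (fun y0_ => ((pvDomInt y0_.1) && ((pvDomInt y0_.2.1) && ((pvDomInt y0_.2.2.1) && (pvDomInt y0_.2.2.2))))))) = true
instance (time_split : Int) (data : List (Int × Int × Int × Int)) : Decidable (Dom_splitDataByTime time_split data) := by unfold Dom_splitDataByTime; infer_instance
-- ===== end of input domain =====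

-- B separates A's fused counter loop into three passes (gap indicators, prefix-sum labels, zip assembly); same O(n) cost.


-- ===== PORT A =====
-- for n, i in enumerate(data[:-1]): d.append(...); if data[n+1][2] - data[n][2] > time_split: counter += 1
-- data[n] / data[n+1] are always in range here (n < len(data) - 1), so pyGetD is exact.
def splitDataByTime (time_split : Int) (data : List (Int × Int × Int × Int)) : List (Int × Int × Int × Int × Int) :=
  (PySem.List.enumerate (PySem.List.slice data none (some (-1))) 0).foldl
    (fun (acc : List (Int × Int × Int × Int × Int) × Int) ni =>
      let n := ni.1
      let i := ni.2
      let d := acc.1 ++ [(i.1, i.2.1, i.2.2.1, i.2.2.2, acc.2)]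
      let counter :=
        if (PySem.List.pyGetD data (n + 1) (0, 0, 0, 0)).2.2.1
             - (PySem.List.pyGetD data n (0, 0, 0, 0)).2.2.1 > time_split
        then acc.2 + 1 else acc.2
      (d, counter))
    ([], 0) |>.1

-- ===== PORT B =====
-- gaps over zip(data, data[1:]); labels as prefix sums (labels[-1] is getLast! of the non-empty list); zip(data[:-1], labels).
def splitDataByTime_alt (time_split : Int) (data : List (Int × Int × Int × Int)) : List (Int × Int × Int × Int × Int) :=
  let gaps : List Int :=
    (data.zip (PySem.List.slice data (some 1) none)).map
      (fun p => if p.2.2.2.1 - p.1.2.2.1 > time_split then 1 else 0)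
  let labels : List Int := gaps.foldl (fun ls g => ls ++ [ls.getLast! + g]) [0]
  ((PySem.List.slice data none (some (-1))).zip labels).map
    (fun p => (p.1.1, p.1.2.1, p.1.2.2.1, p.1.2.2.2, p.2))

-- ===== PRECONDITION & SPEC =====
def Spec_splitDataByTime (time_split : Int) (data : List (Int × Int × Int × Int)) (out : List (Int × Int × Int × Int × Int)) : Prop := out = splitDataByTime_alt time_split data
instance (time_split : Int) (data : List (Int × Int × Int × Int)) (out : List (Int × Int × Int × Int × Int)) : Decidable (Spec_splitDataByTime time_split data out) := by unfold Spec_splitDataByTime; infer_instance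

-- ===== CLAIM (what is proved, stated in full; the proofs are below) =====
def Claim_equal_splitDataByTime : Prop := ∀ (time_split : Int) (data : List (Int × Int × Int × Int)), Dom_splitDataByTime time_split data → Spec_splitDataByTime time_split data (splitDataByTime time_split data)

-- ===== LEMMAS AND PROOFS =====

-- reference: one recursive pass, counter c carried along (characterises A's loop and B's passes)
def pvRef (t c : Int) : List (Int × Int × Int × Int) → List (Int × Int × Int × Int × Int)
  | [] => []
  | [_] => []
  | a :: b :: rest =>
    (a.1, a.2.1, a.2.2.1, a.2.2.2, c) ::
      pvRef t (if b.2.2.1 - a.2.2.1 > t then c + 1 else c) (b :: rest)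

-- prefix sums starting at x
def pvScan (x : Int) : List Int → List Int
  | [] => [x]
  | g :: gs => x :: pvScan (x + g) gs

def pvGaps (t : Int) (data : List (Int × Int × Int × Int)) : List Int :=
  (data.zip (data.drop 1)).map (fun p => if p.2.2.2.1 - p.1.2.2.1 > t then 1 else 0)

lemma pvLab (gs : List Int) : ∀ (pre : List Int) (x : Int),
    gs.foldl (fun ls g => ls ++ [ls.getLast! + g]) (pre ++ [x]) = pre ++ pvScan x gs := by
  induction gs with
  | nil => intro pre x; simp [pvScan]
  | cons g gs ih =>
    intro pre x
    have h : (pre ++ [x]).getLast! = x := by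
      cases pre <;> simp [List.getLast!]
    simp only [List.foldl_cons, h, pvScan]
    have := ih (pre ++ [x]) (x + g)
    simpa using this

lemma pvB_core (t : Int) : ∀ (data : List (Int × Int × Int × Int)) (c : Int),
    ((data.dropLast).zip (pvScan c (pvGaps t data))).map
      (fun p => (p.1.1, p.1.2.1, p.1.2.2.1, p.1.2.2.2, p.2)) = pvRef t c data := by
  intro data
  induction data with
  | nil => intro c; simp [pvGaps, pvRef]
  | cons a tail ih =>
    intro c
    cases tail with
    | nil => simp [pvGaps, pvScan, pvRef]
    | cons b rest =>
      have hg : pvGaps t (a :: b :: rest)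
          = (if b.2.2.1 - a.2.2.1 > t then (1:Int) else 0) :: pvGaps t (b :: rest) := by
        simp [pvGaps]
      have hc : c + (if b.2.2.1 - a.2.2.1 > t then (1:Int) else 0)
          = (if b.2.2.1 - a.2.2.1 > t then c + 1 else c) := by
        split <;> omega
      simp only [hg, pvScan, List.dropLast_cons₂, List.zip_cons_cons, List.map_cons, hc,
        ih (if b.2.2.1 - a.2.2.1 > t then c + 1 else c), pvRef]

lemma pvA_loop (t : Int) (data : List (Int × Int × Int × Int)) :
    ∀ (m k : Nat) (acc : List (Int × Int × Int × Int × Int)) (c : Int),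
    data.length - k = m →
    ((PySem.List.enumerate ((data.dropLast).drop k) (k : Int)).foldl
      (fun (acc : List (Int × Int × Int × Int × Int) × Int) ni =>
        let n := ni.1
        let i := ni.2
        let d := acc.1 ++ [(i.1, i.2.1, i.2.2.1, i.2.2.2, acc.2)]
        let counter :=
          if (PySem.List.pyGetD data (n + 1) (0, 0, 0, 0)).2.2.1
               - (PySem.List.pyGetD data n (0, 0, 0, 0)).2.2.1 > t
          then acc.2 + 1 else acc.2
        (d, counter)) (acc, c)).1 = acc ++ pvRef t c (data.drop k) := by
  intro m
  induction m with
  | zero =>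
    intro k acc c hm
    have hk : data.length ≤ k := by omega
    have h1 : (data.dropLast).drop k = [] := by
      apply List.drop_eq_nil_of_le; simp; omega
    have h2 : data.drop k = [] := List.drop_eq_nil_of_le hk
    simp [h1, h2, pvRef]
  | succ m ih =>
    intro k acc c hm
    have hk : k < data.length := by omega
    by_cases hk1 : k + 1 < data.length
    · have hdrop : data.drop k = data[k] :: data[k+1] :: data.drop (k+2) := by
        rw [List.drop_eq_getElem_cons hk, List.drop_eq_getElem_cons hk1]
      have hdl : (data.dropLast).drop k = data[k] :: (data.dropLast).drop (k+1) := by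
        have hlt : k < data.dropLast.length := by simp; omega
        rw [List.drop_eq_getElem_cons hlt, List.getElem_dropLast]
      have hget1 : PySem.List.pyGetD data ((k : Int) + 1) (0,0,0,0) = data[k+1] := by
        have : ((k : Int) + 1) = ((k + 1 : Nat) : Int) := by push_cast; ring
        rw [this, PySem.List.pyGetD_natCast, List.getD_eq_getElem _ _ hk1]
      have hget0 : PySem.List.pyGetD data ((k : Int)) (0,0,0,0) = data[k] := by
        rw [PySem.List.pyGetD_natCast, List.getD_eq_getElem _ _ hk]
      rw [hdl, PySem.List.enumerate_cons, List.foldl_cons]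
      simp only [hget0, hget1]
      have hcast : (k : Int) + 1 = ((k + 1 : Nat) : Int) := by push_cast; ring
      rw [hcast, ih (k+1) _ _ (by omega)]
      rw [hdrop]
      simp only [pvRef, List.append_assoc, List.singleton_append]
      rw [List.drop_eq_getElem_cons hk1]
    · -- k is the last index: dropLast.drop k = [], drop k = [data[k]]
      have h1 : (data.dropLast).drop k = [] := by
        apply List.drop_eq_nil_of_le; simp; omega
      have hdrop : data.drop k = [data[k]] := by
        rw [List.drop_eq_getElem_cons hk]
        congr 1
        exact List.drop_eq_nil_of_le (by omega)
      simp [h1, hdrop, pvRef]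

-- ===== VERDICT (by name: the statement is the Claim_ definition above) =====
theorem splitDataByTime_spec : Claim_equal_splitDataByTime := by
  intro t data _
  show splitDataByTime t data = splitDataByTime_alt t data
  have hA := pvA_loop t data data.length 0 [] 0 (by simp)
  have hB := pvB_core t data 0
  have hlab := pvLab (pvGaps t data) [] 0
  unfold splitDataByTime splitDataByTime_alt
  simp only [PySem.List.slice_to_neg_one, PySem.List.slice_from_one]
  simp only [List.drop_zero, Nat.cast_zero] at hA
  rw [hA]
  show pvRef t 0 data = _
  have hgaps : (data.zip data.tail).map
      (fun p => if p.2.2.2.1 - p.1.2.2.1 > t then (1:Int) else 0) = pvGaps t data := by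
    simp [pvGaps, List.drop_one]
  simp only [hgaps]
  rw [show ([0] : List Int) = [] ++ [0] from rfl, hlab]
  simpa using hB.symm
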